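-- pv_equiv track=rewrite | github.com/Phazer-stack/TimelineProbabilities | SUPSTRING/superpBC.py | superpose
-- ===== SOURCE A (Python) =====
-- def superpose(string1, string2, voc1, voc2):
--     if len(string1) == len(string2) == 0:
--         return [string1]
--     else:
--         temp = []
--         if len(string1) > 0:
--             h1 = string1[0]
--             t1 = string1[1:]
--             if len(string2) > 0:
--                 h2 = string2[0]
--                 t2 = string2[1:]
--                 h3 = h1.union(h2)
--                 h1v2 = h1.intersection(voc2)
--                 if h1v2.issubset(h2):
--                     h2v1 = h2.intersection(voc1)
--                     if h2v1.issubset(h1):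
--                         for res in superpose(t1, t2, voc1, voc2):
--                             temp.append([h3] + res)
--                         for res in superpose(string1, t2, voc1, voc2):
--                             temp.append([h3] + res)
--                         for res in superpose(t1, string2, voc1, voc2):
--                             temp.append([h3] + res)
--         return temp
-- ===== SOURCE B (Python) =====
-- def superpose(string1, string2, voc1, voc2):
--     # Bottom-up DP over suffix pairs: row[j] holds the results for
--     # (string1[i:], string2[j:]); each row is computed once from the row below,
--     # so no subproblem is ever recomputed.
--     m = len(string2)
--     row = [[] for _ in range(m)] + [[[]]]
--     for i in range(len(string1) - 1, -1, -1):
--         h1 = string1[i]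
--         new = [[]]
--         for j in range(m - 1, -1, -1):
--             h2 = string2[j]
--             if h1.intersection(voc2).issubset(h2) and h2.intersection(voc1).issubset(h1):
--                 h3 = h1.union(h2)
--                 cell = [[h3] + r for r in row[j + 1] + new[0] + row[j]]
--             else:
--                 cell = []
--             new = [cell] + new
--         row = new
--     return row[0]
-- ===== Notes on version B (the rewrite author's own statement) =====
-- stated objective: alternative
-- what changed: Replaces A's three-way recursion on suffix pairs (which recomputes identical subproblems) with a bottom-up dynamic-programming table over suffix-index pairs, computing each (i,j) subproblem exactly once row by row; on output-heavy inputs both are dominated by the output size, so no speed claim.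
import Mathlib
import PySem

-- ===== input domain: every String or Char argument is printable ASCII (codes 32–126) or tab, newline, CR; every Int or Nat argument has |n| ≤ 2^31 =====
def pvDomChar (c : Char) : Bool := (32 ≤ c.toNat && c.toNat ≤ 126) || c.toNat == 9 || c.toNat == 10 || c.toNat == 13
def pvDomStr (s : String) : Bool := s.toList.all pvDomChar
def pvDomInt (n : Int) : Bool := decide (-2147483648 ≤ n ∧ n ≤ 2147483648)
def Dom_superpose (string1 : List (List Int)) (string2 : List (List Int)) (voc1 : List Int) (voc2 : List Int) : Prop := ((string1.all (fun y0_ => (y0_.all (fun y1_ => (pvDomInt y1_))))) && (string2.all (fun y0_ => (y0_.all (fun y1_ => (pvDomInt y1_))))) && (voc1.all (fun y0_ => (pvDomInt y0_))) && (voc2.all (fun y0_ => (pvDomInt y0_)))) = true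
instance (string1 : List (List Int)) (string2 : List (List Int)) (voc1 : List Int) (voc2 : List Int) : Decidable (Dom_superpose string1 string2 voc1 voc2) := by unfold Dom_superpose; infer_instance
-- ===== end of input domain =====

-- B replaces A's overlapping three-way recursion by a bottom-up DP table over suffix
-- pairs, computing each (i,j) subproblem exactly once; objective: alternative algorithm.

-- ===== PORT A =====
-- literal port of A's recursion on (string1, string2); the cond tests are nested as in A
def superpose (string1 : List (List Int)) (string2 : List (List Int)) (voc1 : List Int) (voc2 : List Int) : List (List (List Int)) :=
  match string1, string2 with
  | [], [] => [[]]
  | [], _ :: _ => []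
  | _ :: _, [] => []
  | h1 :: t1, h2 :: t2 =>
      let h3 := PySem.Set.union h1 h2
      let h1v2 := PySem.Set.inter h1 voc2
      if PySem.Set.issubset h1v2 h2 then
        let h2v1 := PySem.Set.inter h2 voc1
        if PySem.Set.issubset h2v1 h1 then
          ((superpose t1 t2 voc1 voc2).map (fun res => h3 :: res)) ++
          ((superpose (h1 :: t1) t2 voc1 voc2).map (fun res => h3 :: res)) ++
          ((superpose t1 (h2 :: t2) voc1 voc2).map (fun res => h3 :: res))
        else []
      else []
  termination_by string1.length + string2.length
  decreasing_by all_goals (simp only [List.length_cons]; omega)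

-- ===== PORT B =====
-- the inner loop of Source B (j from m-1 downto 0), building the new row right-to-left;
-- recursion on (string2-suffix, row-suffix) replaces Python's index arithmetic
def pvRowStep (h1 : List Int) (voc1 : List Int) (voc2 : List Int) : List (List Int) → List (List (List (List Int))) → List (List (List (List Int)))
  | [], _ => [[]]
  | h2 :: u, row =>
      let new := pvRowStep h1 voc1 voc2 u row.tail
      let cell :=
        if PySem.Set.issubset (PySem.Set.inter h1 voc2) h2 && PySem.Set.issubset (PySem.Set.inter h2 voc1) h1 then
          let h3 := PySem.Set.union h1 h2
          ((row.tail.headD []) ++ (new.headD []) ++ (row.headD [])).map (fun r => h3 :: r)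
        else []
      cell :: new

def superpose_alt (string1 : List (List Int)) (string2 : List (List Int)) (voc1 : List Int) (voc2 : List Int) : List (List (List Int)) :=
  let base : List (List (List (List Int))) := (string2.map (fun _ => [])) ++ [[[]]]
  (string1.foldr (fun h1 row => pvRowStep h1 voc1 voc2 string2 row) base).headD []

-- ===== PRECONDITION & SPEC =====
def Spec_superpose (string1 : List (List Int)) (string2 : List (List Int)) (voc1 : List Int) (voc2 : List Int) (out : List (List (List Int))) : Prop := out = superpose_alt string1 string2 voc1 voc2
instance (string1 : List (List Int)) (string2 : List (List Int)) (voc1 : List Int) (voc2 : List Int) (out : List (List (List Int))) : Decidable (Spec_superpose string1 string2 voc1 voc2 out) := by unfold Spec_superpose; infer_instance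

-- ===== CLAIM (what is proved, stated in full; the proofs are below) =====
def Claim_equal_superpose : Prop := ∀ (string1 : List (List Int)) (string2 : List (List Int)) (voc1 : List Int) (voc2 : List Int), Dom_superpose string1 string2 voc1 voc2 → Spec_superpose string1 string2 voc1 voc2 (superpose string1 string2 voc1 voc2)

-- ===== LEMMAS AND PROOFS =====

-- the row invariant: after folding a suffix s1 of string1, the row is
-- [superpose s1 u for each suffix u of s2] (longest suffix first)
theorem pvRow_base (voc1 voc2 : List Int) (s2 : List (List Int)) :
    (s2.map (fun _ => ([] : List (List (List Int))))) ++ [[[]]] =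
      s2.tails.map (fun u => superpose [] u voc1 voc2) := by
  induction s2 with
  | nil => simp [superpose]
  | cons h t ih =>
      simp only [List.map_cons, List.cons_append, List.tails_cons, ih]
      simp [superpose]

theorem pvRow_step (h1 : List Int) (voc1 voc2 : List Int) (s1 : List (List Int)) :
    ∀ s2 : List (List Int),
      pvRowStep h1 voc1 voc2 s2 (s2.tails.map (fun u => superpose s1 u voc1 voc2)) =
        s2.tails.map (fun u => superpose (h1 :: s1) u voc1 voc2) := by
  intro s2
  induction s2 with
  | nil => simp [pvRowStep, superpose]
  | cons h2 u ih =>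
      have htu : (u.tails.map (fun v => superpose s1 v voc1 voc2)).headD [] =
          superpose s1 u voc1 voc2 := by cases u <;> simp
      have htu' : (u.tails.map (fun v => superpose (h1 :: s1) v voc1 voc2)).headD [] =
          superpose (h1 :: s1) u voc1 voc2 := by cases u <;> simp
      simp only [List.tails_cons, List.map_cons, pvRowStep, List.tail_cons, List.headD_cons,
        ih, htu, htu']
      congr 1
      rw [superpose]
      by_cases c1 : PySem.Set.issubset (PySem.Set.inter h1 voc2) h2 = true
      · by_cases c2 : PySem.Set.issubset (PySem.Set.inter h2 voc1) h1 = true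
        · simp [c1, c2, List.map_append]
        · simp [c1, c2]
      · simp [c1]

theorem pvRow_fold (voc1 voc2 : List Int) (s1 s2 : List (List Int)) :
    s1.foldr (fun h1 row => pvRowStep h1 voc1 voc2 s2 row)
        ((s2.map (fun _ => [])) ++ [[[]]]) =
      s2.tails.map (fun u => superpose s1 u voc1 voc2) := by
  induction s1 with
  | nil => exact pvRow_base voc1 voc2 s2
  | cons h1 t ih => rw [List.foldr_cons, ih, pvRow_step]

-- ===== VERDICT (by name: the statement is the Claim_ definition above) =====
theorem superpose_spec : Claim_equal_superpose := by
  intro s1 s2 voc1 voc2 _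
  show superpose s1 s2 voc1 voc2 =
    ((s1.foldr (fun h1 row => pvRowStep h1 voc1 voc2 s2 row)
        ((s2.map (fun _ => [])) ++ [[[]]])).headD [])
  rw [pvRow_fold]
  cases s2 <;> simp
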